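-- pv_equiv track=rewrite | github.com/DigitalDreams-ai/Public-API-Unlocked | scripts/check_dependency_hygiene.py | has_project_dependencies
-- ===== SOURCE A (Python) =====
-- def has_project_dependencies(cumulusci_text: str) -> bool:
--     in_project_block = False
--     for raw_line in cumulusci_text.splitlines():
--         line = raw_line.rstrip("\n")
--         stripped = line.strip()
--         if not stripped or stripped.startswith("#"):
--             continue
--
--         is_top_level = len(line) - len(line.lstrip(" ")) == 0
--         if is_top_level:
--             in_project_block = stripped.startswith("project:")
--             continue
--
--         if in_project_block and stripped.startswith("dependencies:"):
--             return True
--     return False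
-- ===== SOURCE B (Python) =====
-- def has_project_dependencies(cumulusci_text: str) -> bool:
--     # Pass 1: segment the document into top-level blocks (header, body lines),
--     # skipping blank and comment lines; a block starts at a line with no leading spaces.
--     blocks = []
--     current = None  # the open (header, body) block, or None before the first header
--     for line in cumulusci_text.splitlines():
--         stripped = line.strip()
--         if not stripped or stripped.startswith("#"):
--             continue
--         if len(line) - len(line.lstrip(" ")) == 0:
--             if current is not None:
--                 blocks.append(current)
--             current = (stripped, [])
--         elif current is not None:
--             current = (current[0], current[1] + [stripped])
--     if current is not None:
--         blocks.append(current)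
--     # Pass 2: some project block has a dependencies line in its body.
--     return any(header.startswith("project:")
--                and any(body_line.startswith("dependencies:") for body_line in body)
--                for header, body in blocks)
-- ===== Notes on version B (the rewrite author's own statement) =====
-- stated objective: alternative
-- what changed: Replaces A's single-pass boolean-flag scan with a two-phase decomposition: first segment the document into top-level blocks (header plus indented body lines), then check whether any project-header block has a dependencies body line.
import Mathlib
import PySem

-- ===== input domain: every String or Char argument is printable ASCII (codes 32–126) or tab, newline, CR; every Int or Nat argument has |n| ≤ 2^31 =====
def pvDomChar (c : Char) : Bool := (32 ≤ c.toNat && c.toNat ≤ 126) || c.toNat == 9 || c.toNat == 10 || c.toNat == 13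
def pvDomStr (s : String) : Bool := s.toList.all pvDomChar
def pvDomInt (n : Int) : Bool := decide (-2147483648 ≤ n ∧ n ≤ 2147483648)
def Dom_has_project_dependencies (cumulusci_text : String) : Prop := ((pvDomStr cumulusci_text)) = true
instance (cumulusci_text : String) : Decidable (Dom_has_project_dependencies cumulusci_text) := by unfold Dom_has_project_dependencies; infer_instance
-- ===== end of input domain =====

-- B replaces A's one-pass boolean-flag scan by a group-into-blocks pass followed by a
-- membership check (alternative decomposition, same cost); return values proved equal.

-- ===== PORT A =====
-- raw_line.rstrip("\n"), ported by hand (PySem has no one-sided strip-with-chars); exact: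
-- drop trailing '\n' characters.
def pvRstripNl (s : List Char) : List Char := (s.reverse.dropWhile (· == '\n')).reverse

def pvAGo : List (List Char) → Bool → Bool
  | [], _ => false
  | raw_line :: rest, in_project_block =>
    let line := pvRstripNl raw_line
    let stripped := PySem.Chars.strip line
    if stripped.isEmpty || PySem.Chars.startswith stripped "#".toList then
      pvAGo rest in_project_block
    else if line.length - (line.dropWhile (· == ' ')).length == 0 then
      pvAGo rest (PySem.Chars.startswith stripped "project:".toList)
    else if in_project_block && PySem.Chars.startswith stripped "dependencies:".toList then
      true
    else
      pvAGo rest in_project_block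

def has_project_dependencies (cumulusci_text : String) : Bool :=
  pvAGo ((PySem.Str.splitlines cumulusci_text).map String.toList) false

-- ===== PORT B =====
def pvDep (s : List Char) : Bool := PySem.Chars.startswith s "dependencies:".toList

def pvBlockHit (b : List Char × List (List Char)) : Bool :=
  PySem.Chars.startswith b.1 "project:".toList && b.2.any pvDep

-- pass 1 of Source B: segment the (blank/comment-skipped) lines into top-level blocks,
-- carrying the currently open block (None before the first header).
def pvSeg : List (List Char) → Option (List Char × List (List Char)) → List (List Char × List (List Char))
  | [], current => current.toList
  | line :: rest, current =>
    let stripped := PySem.Chars.strip line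
    if stripped.isEmpty || PySem.Chars.startswith stripped "#".toList then
      pvSeg rest current
    else if line.length - (line.dropWhile (· == ' ')).length == 0 then
      current.toList ++ pvSeg rest (some (stripped, []))
    else
      match current with
      | none => pvSeg rest none
      | some b => pvSeg rest (some (b.1, b.2 ++ [stripped]))

def has_project_dependencies_alt (cumulusci_text : String) : Bool :=
  (pvSeg ((PySem.Str.splitlines cumulusci_text).map String.toList) none).any pvBlockHit

-- ===== PRECONDITION & SPEC =====
def Spec_has_project_dependencies (cumulusci_text : String) (out : Bool) : Prop := out = has_project_dependencies_alt cumulusci_text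
instance (cumulusci_text : String) (out : Bool) : Decidable (Spec_has_project_dependencies cumulusci_text out) := by unfold Spec_has_project_dependencies; infer_instance

-- ===== CLAIM (what is proved, stated in full; the proofs are below) =====
def Claim_equal_has_project_dependencies : Prop := ∀ (cumulusci_text : String), Dom_has_project_dependencies cumulusci_text → Spec_has_project_dependencies cumulusci_text (has_project_dependencies cumulusci_text)

-- ===== LEMMAS AND PROOFS =====

-- every character kept inside a line produced by splitlines.go fails the break test
theorem splitlines_go_no_break (isB : Char → Bool) (s cur : List Char) (acc : List (List Char)) :
    (∀ c ∈ cur, isB c = false) → (∀ l ∈ acc, ∀ c ∈ l, isB c = false) →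
    ∀ l ∈ PySem.Chars.splitlines.go isB s cur acc, ∀ c ∈ l, isB c = false := by
  induction s, cur, acc using PySem.Chars.splitlines.go.induct isB with
  | case1 cur acc he =>
      intro hcur hacc
      unfold PySem.Chars.splitlines.go
      rw [if_pos he]
      intro l hl c hc
      exact hacc l (List.mem_reverse.mp hl) c hc
  | case2 cur acc he =>
      intro hcur hacc
      unfold PySem.Chars.splitlines.go
      rw [if_neg he]
      intro l hl c hc
      rcases List.mem_cons.mp (List.mem_reverse.mp hl) with rfl | h
      · exact hcur c (List.mem_reverse.mp hc)
      · exact hacc l h c hc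
  | case3 rest cur acc ih =>
      intro hcur hacc
      unfold PySem.Chars.splitlines.go
      refine ih (by simp) ?_
      intro l hl c' hc'
      rcases List.mem_cons.mp hl with rfl | h
      · exact hcur c' (List.mem_reverse.mp hc')
      · exact hacc l h c' hc'
  | case4 c rest cur acc hne hB ih =>
      intro hcur hacc
      unfold PySem.Chars.splitlines.go
      split
      · rename_i heq
        exact absurd heq (by simp)
      · rename_i r heq
        injection heq with h1 h2
        exact (hne r h1 h2).elim
      · rename_i c' r heq
        injection heq with h1 h2
        subst h1; subst h2
        rw [if_pos hB]
        refine ih (by simp) ?_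
        intro l hl c'' hc''
        rcases List.mem_cons.mp hl with rfl | h
        · exact hcur c'' (List.mem_reverse.mp hc'')
        · exact hacc l h c'' hc''
  | case5 c rest cur acc hne hB ih =>
      intro hcur hacc
      unfold PySem.Chars.splitlines.go
      split
      · rename_i heq
        exact absurd heq (by simp)
      · rename_i r heq
        injection heq with h1 h2
        exact (hne r h1 h2).elim
      · rename_i c' r heq
        injection heq with h1 h2
        subst h1; subst h2
        rw [if_neg hB]
        refine ih ?_ hacc
        intro c'' hc''
        rcases List.mem_cons.mp hc'' with rfl | h
        · simpa using hB
        · exact hcur c'' h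

theorem splitlines_no_nl (s : List Char) : ∀ l ∈ PySem.Chars.splitlines s, '\n' ∉ l := by
  intro l hl hc
  unfold PySem.Chars.splitlines at hl
  have := splitlines_go_no_break _ s [] [] (by simp) (by simp) l hl '\n' hc
  simp at this

theorem rstripNl_eq (l : List Char) (h : '\n' ∉ l) : pvRstripNl l = l := by
  unfold pvRstripNl
  have : l.reverse.dropWhile (· == '\n') = l.reverse := by
    cases hr : l.reverse with
    | nil => simp
    | cons a t =>
        rw [List.dropWhile_cons_of_neg, ← hr]
        have : a ∈ l := by
          rw [← List.mem_reverse, hr]; exact List.mem_cons_self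
        simp only [beq_iff_eq]
        intro he; exact h (he ▸ this)
  rw [this, List.reverse_reverse]

-- the "hit" invariant: once the open block is a project block whose body already
-- contains a dependencies line, B's final answer is true whatever lines remain
theorem pvSeg_hit (lines : List (List Char)) (h : List Char) (b : List (List Char))
    (hp : PySem.Chars.startswith h "project:".toList = true) (hd : b.any pvDep = true) :
    (pvSeg lines (some (h, b))).any pvBlockHit = true := by
  induction lines generalizing b with
  | nil =>
      have hP : pvBlockHit (h, b) = true := by
        unfold pvBlockHit; rw [hp, hd]; rfl
      simp only [pvSeg, Option.toList_some, List.any_cons, List.any_nil, hP, Bool.true_or]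
  | cons line rest ih =>
      have hP : pvBlockHit (h, b) = true := by
        unfold pvBlockHit; rw [hp, hd]; rfl
      simp only [pvSeg]
      split
      · exact ih b hd
      · split
        · simp only [Option.toList_some, List.cons_append, List.nil_append, List.any_cons,
            hP, Bool.true_or]
        · refine ih (b ++ [PySem.Chars.strip line]) ?_
          simp [List.any_append, hd]

def pvFlagOf : Option (List Char × List (List Char)) → Bool
  | none => false
  | some b => PySem.Chars.startswith b.1 "project:".toList

-- main invariant: while the open block (if any) has no dependencies line yet,
-- A's flag-scan and B's remaining segmentation agree
theorem pvMain (lines : List (List Char)) (cur : Option (List Char × List (List Char)))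
    (hnl : ∀ l ∈ lines, '\n' ∉ l)
    (hinv : ∀ hb, cur = some hb →
      PySem.Chars.startswith hb.1 "project:".toList = true → hb.2.any pvDep = false) :
    pvAGo lines (pvFlagOf cur) = (pvSeg lines cur).any pvBlockHit := by
  induction lines generalizing cur with
  | nil =>
      cases cur with
      | none => simp [pvAGo, pvSeg]
      | some hb =>
          simp only [pvAGo, pvSeg, Option.toList_some, List.any_cons, List.any_nil,
            Bool.or_false, pvBlockHit]
          by_cases hp : PySem.Chars.startswith hb.1 "project:".toList = true
          · rw [hp, hinv hb rfl hp]; rfl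
          · rw [Bool.not_eq_true] at hp; rw [hp]; rfl
  | cons raw rest ih =>
      have hraw : '\n' ∉ raw := hnl raw (List.mem_cons_self)
      have hrest : ∀ l ∈ rest, '\n' ∉ l := fun l hl => hnl l (List.mem_cons_of_mem _ hl)
      simp only [pvAGo, pvSeg, rstripNl_eq raw hraw]
      split
      · exact ih cur hrest hinv
      split
      · -- top-level header line: the old block (if any) cannot hit
        have hold : (cur.toList).any pvBlockHit = false := by
          cases cur with
          | none => simp
          | some hb =>
              simp only [Option.toList_some, List.any_cons, List.any_nil, Bool.or_false,
                pvBlockHit]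
              by_cases hp : PySem.Chars.startswith hb.1 "project:".toList = true
              · rw [hp, hinv hb rfl hp]; rfl
              · rw [Bool.not_eq_true] at hp; rw [hp]; rfl
        rw [List.any_append, hold, Bool.false_or]
        have := ih (some (PySem.Chars.strip raw, []))
          hrest (by intro hb he _; cases he; simp)
        simpa [pvFlagOf] using this
      · cases cur with
        | none =>
            simp only [pvFlagOf, Bool.false_and, if_neg (by simp : ¬ (false = true))]
            exact ih none hrest (by intro hb he; cases he)
        | some hb =>
            simp only [pvFlagOf]
            by_cases hhit : (PySem.Chars.startswith hb.1 "project:".toList &&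
                PySem.Chars.startswith (PySem.Chars.strip raw) "dependencies:".toList) = true
            · rw [if_pos hhit]
              simp only [Bool.and_eq_true] at hhit
              obtain ⟨hp, hd⟩ := hhit
              exact (pvSeg_hit rest hb.1 (hb.2 ++ [PySem.Chars.strip raw]) hp
                (by
                  have hdp : pvDep (PySem.Chars.strip raw) = true := hd
                  simp only [List.any_append, List.any_cons, List.any_nil, hdp,
                    Bool.or_false, Bool.or_true])).symm
            · rw [if_neg hhit]
              have := ih (some (hb.1, hb.2 ++ [PySem.Chars.strip raw])) hrest ?_
              · simpa [pvFlagOf] using this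
              · intro hb' he hp
                cases he
                have hd : pvDep (PySem.Chars.strip raw) = false := by
                  by_contra hdd
                  rw [Bool.not_eq_false] at hdd
                  unfold pvDep at hdd
                  exact hhit (by rw [hp, Bool.true_and]; exact hdd)
                simp [List.any_append, hd, hinv hb rfl hp]

-- ===== VERDICT (by name: the statement is the Claim_ definition above) =====
theorem has_project_dependencies_spec : Claim_equal_has_project_dependencies := by
  intro t _
  unfold Spec_has_project_dependencies has_project_dependencies has_project_dependencies_alt
  have hnl : ∀ l ∈ (PySem.Str.splitlines t).map String.toList, '\n' ∉ l := by
    intro l hl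
    rw [PySem.Str.splitlines_map_toList] at hl
    exact splitlines_no_nl t.toList l hl
  exact pvMain _ none hnl (by intro hb he; cases he)
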